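-- pv_equiv track=rewrite | github.com/elizabethsusmi/PTM-dependent-analysis-of-metabolic-enzymes | PTM_potentiality_rate.py | calculate_ptm_occurrences
-- ===== SOURCE A (Python) =====
-- ptm_rules = {
--     'ADP-Ribosylation': ['E', 'D', 'C', 'G','H','K','R','N','S','Y'],
--     'Acetylation': ['A','K','C','D','E','G','I','L','M','N','P','Q','R','S','T','V','Y'],
--     'Biotinylation': ['K'],
--     'Carbamidation': ['C'],
--     'Carboxylation': ['K'],
--     'Deamidation': ['N', 'Q'],
--     'Dephosphorylation': ['S', 'T', 'Y'],
--     'Farnesylation': ['C'],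
--     'GPI-anchor': ['A','D','G','N','S'],
--     'Geranylgeranylation': ['C'],
--     'Glutarylation': ['K'],
--     'Glutathionylation': ['C'],
--     'Hydroxylation': ['P', 'K','D','H','L','N','R'],
--     'Lipoylation': ['K'],
--     'Malonylation': ['K'],
--     'Methylation': ['K', 'R', 'C','G','H','L','M','N','Q','S'],
--     'N-linked Glycosylation': ['N','C','D','E','F','G','H','I','K','L','M','P','Q','R','S','T','Y','W','V'],
--     'Neddylation': ['K'],
--     'Nitration': ['Y'],
--     'O-linked Glycosylation': ['S', 'T', 'Y','A','D','E','I','G','H','K','L','M','N','P','Q','R','V'],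
--     'Oxidation': ['C','L','M'],
--     'Phosphorylation': ['S', 'T', 'Y','A','C','D','E','F','G','H','I','K','L','M','N','P','Q','R'],
--     'Pyruvate': ['K'],
--     'S-nitrosylation': ['C'],
--     'S-palmitoylation': ['C','A','D','E','G','I','L','M','N','P','Q','R','S','V'],
--     'Succinylation': ['K','C'],
--     'Sulfoxidation': ['M','A','C','D','E','F','G','H','I','K','L','N','P','Q','R','S','T','V','Y','W'],
--     'Sumoylation': ['K','A','S'],
--     'Ubiquitination': ['A','C','D','E','F','G','H','I','K','L','N','P','Q','R','S','T','V','W','Y'],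
-- }
--
-- def calculate_ptm_occurrences(sequence):
--     """
--     Calculate the possible occurrences of each PTM based on rules and the sequence.
--     """
--     sequence = sequence.upper()  # Make sure the sequence is in uppercase
--     ptm_occurrences = {}
--
--     for ptm, residues in ptm_rules.items():
--             count = 0
--             for residue in residues:
--                 count += sequence.count(residue)
--             ptm_occurrences[ptm] = count
--
--     return ptm_occurrences
-- ===== SOURCE B (Python) =====
-- """Reverse-index reimplementation: one pass over the sequence,
-- incrementing the counters of every PTM that accepts each residue."""
--
-- # PTM names in the order of the original PTM rules table.
-- PTM_NAMES = ['ADP-Ribosylation', 'Acetylation', 'Biotinylation', 'Carbamidation', 'Carboxylation', 'Deamidation', 'Dephosphorylation', 'Farnesylation', 'GPI-anchor', 'Geranylgeranylation', 'Glutarylation', 'Glutathionylation', 'Hydroxylation', 'Lipoylation', 'Malonylation', 'Methylation', 'N-linked Glycosylation', 'Neddylation', 'Nitration', 'O-linked Glycosylation', 'Oxidation', 'Phosphorylation', 'Pyruvate', 'S-nitrosylation', 'S-palmitoylation', 'Succinylation', 'Sulfoxidation', 'Sumoylation', 'Ubiquitination']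
--
-- # Reverse index derived once from the PTM rules: residue letter -> PTM names accepting it.
-- RESIDUE_INDEX = {
--     'A': ['Acetylation', 'GPI-anchor', 'O-linked Glycosylation', 'Phosphorylation', 'S-palmitoylation', 'Sulfoxidation', 'Sumoylation', 'Ubiquitination'],
--     'C': ['ADP-Ribosylation', 'Acetylation', 'Carbamidation', 'Farnesylation', 'Geranylgeranylation', 'Glutathionylation', 'Methylation', 'N-linked Glycosylation', 'Oxidation', 'Phosphorylation', 'S-nitrosylation', 'S-palmitoylation', 'Succinylation', 'Sulfoxidation', 'Ubiquitination'],
--     'D': ['ADP-Ribosylation', 'Acetylation', 'GPI-anchor', 'Hydroxylation', 'N-linked Glycosylation', 'O-linked Glycosylation', 'Phosphorylation', 'S-palmitoylation', 'Sulfoxidation', 'Ubiquitination'],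
--     'E': ['ADP-Ribosylation', 'Acetylation', 'N-linked Glycosylation', 'O-linked Glycosylation', 'Phosphorylation', 'S-palmitoylation', 'Sulfoxidation', 'Ubiquitination'],
--     'F': ['N-linked Glycosylation', 'Phosphorylation', 'Sulfoxidation', 'Ubiquitination'],
--     'G': ['ADP-Ribosylation', 'Acetylation', 'GPI-anchor', 'Methylation', 'N-linked Glycosylation', 'O-linked Glycosylation', 'Phosphorylation', 'S-palmitoylation', 'Sulfoxidation', 'Ubiquitination'],
--     'H': ['ADP-Ribosylation', 'Hydroxylation', 'Methylation', 'N-linked Glycosylation', 'O-linked Glycosylation', 'Phosphorylation', 'Sulfoxidation', 'Ubiquitination'],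
--     'I': ['Acetylation', 'N-linked Glycosylation', 'O-linked Glycosylation', 'Phosphorylation', 'S-palmitoylation', 'Sulfoxidation', 'Ubiquitination'],
--     'K': ['ADP-Ribosylation', 'Acetylation', 'Biotinylation', 'Carboxylation', 'Glutarylation', 'Hydroxylation', 'Lipoylation', 'Malonylation', 'Methylation', 'N-linked Glycosylation', 'Neddylation', 'O-linked Glycosylation', 'Phosphorylation', 'Pyruvate', 'Succinylation', 'Sulfoxidation', 'Sumoylation', 'Ubiquitination'],
--     'L': ['Acetylation', 'Hydroxylation', 'Methylation', 'N-linked Glycosylation', 'O-linked Glycosylation', 'Oxidation', 'Phosphorylation', 'S-palmitoylation', 'Sulfoxidation', 'Ubiquitination'],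
--     'M': ['Acetylation', 'Methylation', 'N-linked Glycosylation', 'O-linked Glycosylation', 'Oxidation', 'Phosphorylation', 'S-palmitoylation', 'Sulfoxidation'],
--     'N': ['ADP-Ribosylation', 'Acetylation', 'Deamidation', 'GPI-anchor', 'Hydroxylation', 'Methylation', 'N-linked Glycosylation', 'O-linked Glycosylation', 'Phosphorylation', 'S-palmitoylation', 'Sulfoxidation', 'Ubiquitination'],
--     'P': ['Acetylation', 'Hydroxylation', 'N-linked Glycosylation', 'O-linked Glycosylation', 'Phosphorylation', 'S-palmitoylation', 'Sulfoxidation', 'Ubiquitination'],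
--     'Q': ['Acetylation', 'Deamidation', 'Methylation', 'N-linked Glycosylation', 'O-linked Glycosylation', 'Phosphorylation', 'S-palmitoylation', 'Sulfoxidation', 'Ubiquitination'],
--     'R': ['ADP-Ribosylation', 'Acetylation', 'Hydroxylation', 'Methylation', 'N-linked Glycosylation', 'O-linked Glycosylation', 'Phosphorylation', 'S-palmitoylation', 'Sulfoxidation', 'Ubiquitination'],
--     'S': ['ADP-Ribosylation', 'Acetylation', 'Dephosphorylation', 'GPI-anchor', 'Methylation', 'N-linked Glycosylation', 'O-linked Glycosylation', 'Phosphorylation', 'S-palmitoylation', 'Sulfoxidation', 'Sumoylation', 'Ubiquitination'],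
--     'T': ['Acetylation', 'Dephosphorylation', 'N-linked Glycosylation', 'O-linked Glycosylation', 'Phosphorylation', 'Sulfoxidation', 'Ubiquitination'],
--     'V': ['Acetylation', 'N-linked Glycosylation', 'O-linked Glycosylation', 'S-palmitoylation', 'Sulfoxidation', 'Ubiquitination'],
--     'W': ['N-linked Glycosylation', 'Sulfoxidation', 'Ubiquitination'],
--     'Y': ['ADP-Ribosylation', 'Acetylation', 'Dephosphorylation', 'N-linked Glycosylation', 'Nitration', 'O-linked Glycosylation', 'Phosphorylation', 'Sulfoxidation', 'Ubiquitination'],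
-- }
--
--
-- def calculate_ptm_occurrences(sequence):
--     """
--     Calculate the possible occurrences of each PTM based on rules and the sequence.
--     """
--     occurrences = {ptm: 0 for ptm in PTM_NAMES}
--     for ch in sequence.upper():
--         for ptm in RESIDUE_INDEX.get(ch, []):
--             occurrences[ptm] = occurrences.get(ptm, 0) + 1
--     return occurrences
-- ===== Notes on version B (the rewrite author's own statement) =====
-- stated objective: idiomatic
-- what changed: B replaces A's per-PTM loop of ~340 full-string count() scans by a reverse index (residue letter -> PTM names): it initialises every PTM counter to 0 and makes one pass over the uppercased sequence, incrementing the counters of all PTMs that accept each character.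
import Mathlib
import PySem

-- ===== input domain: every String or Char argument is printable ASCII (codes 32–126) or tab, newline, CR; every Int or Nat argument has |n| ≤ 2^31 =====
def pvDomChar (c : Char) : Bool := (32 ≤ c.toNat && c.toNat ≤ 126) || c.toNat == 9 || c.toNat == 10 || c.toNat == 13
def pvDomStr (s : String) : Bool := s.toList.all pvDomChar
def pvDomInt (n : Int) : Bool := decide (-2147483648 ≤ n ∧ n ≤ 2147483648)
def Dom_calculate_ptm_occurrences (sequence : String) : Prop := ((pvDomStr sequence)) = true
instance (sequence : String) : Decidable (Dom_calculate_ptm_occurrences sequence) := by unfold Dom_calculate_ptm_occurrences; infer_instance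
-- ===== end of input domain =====

-- B replaces A's per-PTM residue-by-residue count() scans by a reverse index
-- (residue letter -> PTM names) and a single incrementing pass over the sequence
-- (objective: idiomatic; no speed claim).

def ptm_rules : List (String × List Char) :=
[
  ("ADP-Ribosylation", ['E', 'D', 'C', 'G', 'H', 'K', 'R', 'N', 'S', 'Y']),
  ("Acetylation", ['A', 'K', 'C', 'D', 'E', 'G', 'I', 'L', 'M', 'N', 'P', 'Q', 'R', 'S', 'T', 'V', 'Y']),
  ("Biotinylation", ['K']),
  ("Carbamidation", ['C']),
  ("Carboxylation", ['K']),
  ("Deamidation", ['N', 'Q']),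
  ("Dephosphorylation", ['S', 'T', 'Y']),
  ("Farnesylation", ['C']),
  ("GPI-anchor", ['A', 'D', 'G', 'N', 'S']),
  ("Geranylgeranylation", ['C']),
  ("Glutarylation", ['K']),
  ("Glutathionylation", ['C']),
  ("Hydroxylation", ['P', 'K', 'D', 'H', 'L', 'N', 'R']),
  ("Lipoylation", ['K']),
  ("Malonylation", ['K']),
  ("Methylation", ['K', 'R', 'C', 'G', 'H', 'L', 'M', 'N', 'Q', 'S']),
  ("N-linked Glycosylation", ['N', 'C', 'D', 'E', 'F', 'G', 'H', 'I', 'K', 'L', 'M', 'P', 'Q', 'R', 'S', 'T', 'Y', 'W', 'V']),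
  ("Neddylation", ['K']),
  ("Nitration", ['Y']),
  ("O-linked Glycosylation", ['S', 'T', 'Y', 'A', 'D', 'E', 'I', 'G', 'H', 'K', 'L', 'M', 'N', 'P', 'Q', 'R', 'V']),
  ("Oxidation", ['C', 'L', 'M']),
  ("Phosphorylation", ['S', 'T', 'Y', 'A', 'C', 'D', 'E', 'F', 'G', 'H', 'I', 'K', 'L', 'M', 'N', 'P', 'Q', 'R']),
  ("Pyruvate", ['K']),
  ("S-nitrosylation", ['C']),
  ("S-palmitoylation", ['C', 'A', 'D', 'E', 'G', 'I', 'L', 'M', 'N', 'P', 'Q', 'R', 'S', 'V']),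
  ("Succinylation", ['K', 'C']),
  ("Sulfoxidation", ['M', 'A', 'C', 'D', 'E', 'F', 'G', 'H', 'I', 'K', 'L', 'N', 'P', 'Q', 'R', 'S', 'T', 'V', 'Y', 'W']),
  ("Sumoylation", ['K', 'A', 'S']),
  ("Ubiquitination", ['A', 'C', 'D', 'E', 'F', 'G', 'H', 'I', 'K', 'L', 'N', 'P', 'Q', 'R', 'S', 'T', 'V', 'W', 'Y'])]

def ptm_names : List String :=
["ADP-Ribosylation", "Acetylation", "Biotinylation", "Carbamidation", "Carboxylation", "Deamidation", "Dephosphorylation", "Farnesylation", "GPI-anchor", "Geranylgeranylation", "Glutarylation", "Glutathionylation", "Hydroxylation", "Lipoylation", "Malonylation", "Methylation", "N-linked Glycosylation", "Neddylation", "Nitration", "O-linked Glycosylation", "Oxidation", "Phosphorylation", "Pyruvate", "S-nitrosylation", "S-palmitoylation", "Succinylation", "Sulfoxidation", "Sumoylation", "Ubiquitination"]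

def residue_index : List (Char × List String) :=
[
  ('A', ["Acetylation", "GPI-anchor", "O-linked Glycosylation", "Phosphorylation", "S-palmitoylation", "Sulfoxidation", "Sumoylation", "Ubiquitination"]),
  ('C', ["ADP-Ribosylation", "Acetylation", "Carbamidation", "Farnesylation", "Geranylgeranylation", "Glutathionylation", "Methylation", "N-linked Glycosylation", "Oxidation", "Phosphorylation", "S-nitrosylation", "S-palmitoylation", "Succinylation", "Sulfoxidation", "Ubiquitination"]),
  ('D', ["ADP-Ribosylation", "Acetylation", "GPI-anchor", "Hydroxylation", "N-linked Glycosylation", "O-linked Glycosylation", "Phosphorylation", "S-palmitoylation", "Sulfoxidation", "Ubiquitination"]),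
  ('E', ["ADP-Ribosylation", "Acetylation", "N-linked Glycosylation", "O-linked Glycosylation", "Phosphorylation", "S-palmitoylation", "Sulfoxidation", "Ubiquitination"]),
  ('F', ["N-linked Glycosylation", "Phosphorylation", "Sulfoxidation", "Ubiquitination"]),
  ('G', ["ADP-Ribosylation", "Acetylation", "GPI-anchor", "Methylation", "N-linked Glycosylation", "O-linked Glycosylation", "Phosphorylation", "S-palmitoylation", "Sulfoxidation", "Ubiquitination"]),
  ('H', ["ADP-Ribosylation", "Hydroxylation", "Methylation", "N-linked Glycosylation", "O-linked Glycosylation", "Phosphorylation", "Sulfoxidation", "Ubiquitination"]),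
  ('I', ["Acetylation", "N-linked Glycosylation", "O-linked Glycosylation", "Phosphorylation", "S-palmitoylation", "Sulfoxidation", "Ubiquitination"]),
  ('K', ["ADP-Ribosylation", "Acetylation", "Biotinylation", "Carboxylation", "Glutarylation", "Hydroxylation", "Lipoylation", "Malonylation", "Methylation", "N-linked Glycosylation", "Neddylation", "O-linked Glycosylation", "Phosphorylation", "Pyruvate", "Succinylation", "Sulfoxidation", "Sumoylation", "Ubiquitination"]),
  ('L', ["Acetylation", "Hydroxylation", "Methylation", "N-linked Glycosylation", "O-linked Glycosylation", "Oxidation", "Phosphorylation", "S-palmitoylation", "Sulfoxidation", "Ubiquitination"]),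
  ('M', ["Acetylation", "Methylation", "N-linked Glycosylation", "O-linked Glycosylation", "Oxidation", "Phosphorylation", "S-palmitoylation", "Sulfoxidation"]),
  ('N', ["ADP-Ribosylation", "Acetylation", "Deamidation", "GPI-anchor", "Hydroxylation", "Methylation", "N-linked Glycosylation", "O-linked Glycosylation", "Phosphorylation", "S-palmitoylation", "Sulfoxidation", "Ubiquitination"]),
  ('P', ["Acetylation", "Hydroxylation", "N-linked Glycosylation", "O-linked Glycosylation", "Phosphorylation", "S-palmitoylation", "Sulfoxidation", "Ubiquitination"]),
  ('Q', ["Acetylation", "Deamidation", "Methylation", "N-linked Glycosylation", "O-linked Glycosylation", "Phosphorylation", "S-palmitoylation", "Sulfoxidation", "Ubiquitination"]),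
  ('R', ["ADP-Ribosylation", "Acetylation", "Hydroxylation", "Methylation", "N-linked Glycosylation", "O-linked Glycosylation", "Phosphorylation", "S-palmitoylation", "Sulfoxidation", "Ubiquitination"]),
  ('S', ["ADP-Ribosylation", "Acetylation", "Dephosphorylation", "GPI-anchor", "Methylation", "N-linked Glycosylation", "O-linked Glycosylation", "Phosphorylation", "S-palmitoylation", "Sulfoxidation", "Sumoylation", "Ubiquitination"]),
  ('T', ["Acetylation", "Dephosphorylation", "N-linked Glycosylation", "O-linked Glycosylation", "Phosphorylation", "Sulfoxidation", "Ubiquitination"]),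
  ('V', ["Acetylation", "N-linked Glycosylation", "O-linked Glycosylation", "S-palmitoylation", "Sulfoxidation", "Ubiquitination"]),
  ('W', ["N-linked Glycosylation", "Sulfoxidation", "Ubiquitination"]),
  ('Y', ["ADP-Ribosylation", "Acetylation", "Dephosphorylation", "N-linked Glycosylation", "Nitration", "O-linked Glycosylation", "Phosphorylation", "Sulfoxidation", "Ubiquitination"])]

-- ===== PORT A =====
-- for each PTM: count = sum over residues of sequence.count(residue); dict built by assignment
def calculate_ptm_occurrences (sequence : String) : List (String × Int) :=
  let seq := PySem.Str.upper sequence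
  (ptm_rules.foldl
    (fun (d : PySem.Dict String Int) pr =>
      d.insert pr.1 (pr.2.foldl (fun count r => count + (PySem.Str.count seq (String.ofList [r]) : Int)) 0))
    PySem.Dict.empty).items

-- ===== PORT B =====
-- occurrences = {ptm: 0 for ptm in PTM_NAMES}; for ch in sequence.upper():
--   for ptm in RESIDUE_INDEX.get(ch, []): occurrences[ptm] = occurrences.get(ptm, 0) + 1
def calculate_ptm_occurrences_alt (sequence : String) : List (String × Int) :=
  let occurrences := ptm_names.foldl (fun (d : PySem.Dict String Int) ptm => d.insert ptm 0) PySem.Dict.empty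
  let idx := PySem.Dict.ofList residue_index
  ((PySem.Str.upper sequence).toList.foldl
    (fun (d : PySem.Dict String Int) ch =>
      (idx.getD ch []).foldl (fun d ptm => d.insert ptm (d.getD ptm 0 + 1)) d)
    occurrences).items

-- ===== PRECONDITION & SPEC =====
def Spec_calculate_ptm_occurrences (sequence : String) (out : List (String × Int)) : Prop := out = calculate_ptm_occurrences_alt sequence
instance (sequence : String) (out : List (String × Int)) : Decidable (Spec_calculate_ptm_occurrences sequence out) := by unfold Spec_calculate_ptm_occurrences; infer_instance

-- ===== CLAIM (what is proved, stated in full; the proofs are below) =====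
def Claim_equal_calculate_ptm_occurrences : Prop := ∀ (sequence : String), Dom_calculate_ptm_occurrences sequence → Spec_calculate_ptm_occurrences sequence (calculate_ptm_occurrences sequence)

-- ===== LEMMAS AND PROOFS =====

-- Python s.count(c) for a single character c is the character count
theorem count_go_singleton (c : Char) :
    ∀ (l : List Char) (fuel acc : Nat), l.length ≤ fuel →
      PySem.Chars.count.go [c] fuel l acc = acc + l.count c := by
  intro l
  induction l with
  | nil => intro fuel acc _; cases fuel <;> simp [PySem.Chars.count.go]
  | cons h t ih =>
      intro fuel acc hf
      cases fuel with
      | zero => simp at hf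
      | succ n =>
          have ht : t.length ≤ n := by simpa using hf
          by_cases hc : c = h
          · subst hc
            simp [PySem.Chars.count.go, List.isPrefixOf, ih n (acc + 1) ht]
            omega
          · have hb : (c == h) = false := by simp [hc]
            have hc' : ¬ h = c := fun hh => hc hh.symm
            simp [PySem.Chars.count.go, List.isPrefixOf, hb, ih n acc ht, hc']

theorem chars_count_singleton (l : List Char) (c : Char) :
    PySem.Chars.count l [c] = l.count c := by
  simp [PySem.Chars.count, count_go_singleton c l l.length 0 le_rfl]

-- a running int sum over a residue list equals the sum of the individual counts
theorem foldl_add_sum (up : List Char) :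
    ∀ (rs : List Char) (a : Int),
      rs.foldl (fun count r => count + (up.count r : Int)) a =
        a + ((rs.map (fun r => (up.count r : Int))).sum) := by
  intro rs
  induction rs with
  | nil => intro a; simp
  | cons r t ih =>
      intro a
      simp only [List.foldl_cons, List.map_cons, List.sum_cons, ih]
      ring

-- lookup in a literal dict, characterised through the filtered key column
theorem mem_getD_mk (p : String) :
    ∀ (table : List (Char × List String)), (table.map (fun e => e.1)).Nodup →
      ∀ ch, (p ∈ (PySem.Dict.mk table).getD ch []) ↔
        ch ∈ (table.filter (fun e => decide (p ∈ e.2))).map (fun e => e.1) := by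
  intro table
  induction table with
  | nil => intro _ ch; simp [PySem.Dict.getD_eq_get?_getD, PySem.Dict.get?]
  | cons hd tl ih =>
      intro hnd ch
      obtain ⟨k, ps⟩ := hd
      have hnd' : (tl.map (fun e => e.1)).Nodup := (List.nodup_cons.mp hnd).2
      have hni : k ∉ tl.map (fun e => e.1) := by simpa using (List.nodup_cons.mp hnd).1
      rw [PySem.Dict.getD_eq_get?_getD, PySem.Dict.get?_mk_cons]
      by_cases he : k = ch
      · subst he
        have htl : k ∉ (tl.filter (fun e => decide (p ∈ e.2))).map (fun e => e.1) := by
          intro hmem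
          apply hni
          rcases List.mem_map.mp hmem with ⟨e, hef, hk⟩
          exact List.mem_map.mpr ⟨e, List.mem_of_mem_filter hef, hk⟩
        by_cases hp : p ∈ ps <;> simp [List.filter_cons, hp, htl]
      · have hb : (k == ch) = false := by simp [he]
        have hne : ch ≠ k := fun h => he h.symm
        have hrec := ih hnd' ch
        rw [PySem.Dict.getD_eq_get?_getD] at hrec
        by_cases hp : p ∈ ps <;> simp [List.filter_cons, hb, hp, hrec, hne]

-- ptm_names is exactly the key column of ptm_rules, without duplicates
theorem names_eq : ptm_names = ptm_rules.map (fun pr => pr.1) := by decide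

theorem names_nodup : ptm_names.Nodup := by decide

-- per-rule facts about the tables, checked by computation
theorem rules_nodup : ∀ pr ∈ ptm_rules, pr.2.Nodup := by decide

def index_keys : List Char :=
  ['A','C','D','E','F','G','H','I','K','L','M','N','P','Q','R','S','T','V','W','Y']

theorem index_keys_eq : residue_index.map (fun e => e.1) = index_keys := by decide

theorem rules_keys_bool :
    (ptm_rules.all (fun pr => pr.2.all (fun c => index_keys.contains c))) = true := by rfl

theorem rules_keys : ∀ pr ∈ ptm_rules, ∀ c ∈ pr.2, c ∈ index_keys := by
  have h := rules_keys_bool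
  simp only [List.all_eq_true, List.contains_eq_mem, decide_eq_true_eq] at h
  exact h

theorem cross_fact : ∀ pr ∈ ptm_rules, ∀ e ∈ residue_index,
    (decide (pr.1 ∈ e.2)) = decide (e.1 ∈ pr.2) := by decide

theorem index_facts : ∀ e ∈ residue_index, e.2.Nodup ∧ ∀ p ∈ e.2, p ∈ ptm_names := by decide

theorem index_keys_nodup : (residue_index.map (fun e => e.1)).Nodup := by decide

-- membership in the key column of a key-filtered table
theorem mem_map_fst_filter_key (q : Char → Bool) (ch : Char) :
    ∀ table : List (Char × List String),
      (ch ∈ (table.filter (fun e => q e.1)).map (fun e => e.1)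
        ↔ ch ∈ table.map (fun e => e.1) ∧ q ch = true) := by
  intro table
  induction table with
  | nil => simp
  | cons hd tl ih =>
      by_cases hq : q hd.1 = true
      · by_cases he : ch = hd.1
        · subst he; simp [List.filter_cons, hq]
        · simp [List.filter_cons, hq, ih, he]
      · by_cases he : ch = hd.1
        · subst he; simp [List.filter_cons, hq, ih]
        · simp [List.filter_cons, hq, ih, he]

set_option maxRecDepth 10000 in
theorem ofList_index : PySem.Dict.ofList residue_index = PySem.Dict.mk residue_index := by decide

-- the inner increment loop, on a dict whose items are ptm_names tagged with v
theorem inner_fold :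
    ∀ (ps : List String) (v : String → Int) (d : PySem.Dict String Int),
      ps.Nodup → (∀ p ∈ ps, p ∈ ptm_names) →
      d.items = ptm_names.map (fun p => (p, v p)) →
      (ps.foldl (fun d ptm => d.insert ptm (d.getD ptm 0 + 1)) d).items
        = ptm_names.map (fun p => (p, v p + if p ∈ ps then 1 else 0)) := by
  intro ps
  induction ps with
  | nil => intro v d _ _ hd; simpa using hd
  | cons h t ih =>
      intro v d hnd hsub hd
      have hkeys : d.keys = ptm_names := by
        simp [PySem.Dict.keys, hd, List.map_map, Function.comp_def]
      have hknd : d.keys.Nodup := by rw [hkeys]; exact names_nodup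
      have hmem : h ∈ ptm_names := hsub h (by simp)
      have hitem : (h, v h) ∈ d.items := by
        rw [hd]; exact List.mem_map.mpr ⟨h, hmem, rfl⟩
      have hget : d.getD h 0 = v h := PySem.Dict.getD_of_mem_items _ hitem hknd 0
      have hcon : d.contains h = true := by
        rw [PySem.Dict.contains_iff_mem_keys, hkeys]; exact hmem
      have hins : (d.insert h (d.getD h 0 + 1)).items
          = ptm_names.map (fun p => (p, if p = h then v h + 1 else v p)) := by
        rw [PySem.Dict.items_insert_of_contains _ _ hcon, hd, hget, List.map_map]
        apply List.map_congr_left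
        intro p _
        by_cases hp : p = h
        · subst hp; simp
        · simp [Function.comp, hp]
      have hht : h ∉ t := (List.nodup_cons.mp hnd).1
      rw [List.foldl_cons,
        ih (fun p => if p = h then v h + 1 else v p) _ (List.nodup_cons.mp hnd).2
          (fun p hp => hsub p (by simp [hp])) hins]
      apply List.map_congr_left
      intro p _
      by_cases hp : p = h
      · subst hp; simp [hht]
      · simp [hp]

-- the contents of one index lookup: empty, or one of the table's rows
theorem getD_index_cases (ch : Char) :
    (PySem.Dict.mk residue_index).getD ch [] = [] ∨
    ∃ e ∈ residue_index, (PySem.Dict.mk residue_index).getD ch [] = e.2 := by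
  rcases hg : (PySem.Dict.mk residue_index).get? ch with _ | ps
  · left; exact PySem.Dict.getD_of_get?_eq_none _ _ hg
  · right
    have hmem := PySem.Dict.mem_items_of_get?_eq_some _ hg
    exact ⟨(ch, ps), hmem, PySem.Dict.getD_of_get?_eq_some _ _ hg⟩

-- the whole sequence pass, with the per-PTM count expressed as a countP
theorem outer_fold :
    ∀ (l : List Char) (v : String → Int) (d : PySem.Dict String Int),
      d.items = ptm_names.map (fun p => (p, v p)) →
      (l.foldl
        (fun d ch => ((PySem.Dict.mk residue_index).getD ch []).foldl
          (fun d ptm => d.insert ptm (d.getD ptm 0 + 1)) d) d).items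
        = ptm_names.map (fun p =>
            (p, v p + (l.countP (fun ch => decide (p ∈ (PySem.Dict.mk residue_index).getD ch [])) : Int))) := by
  intro l
  induction l with
  | nil => intro v d hd; simpa using hd
  | cons ch t ih =>
      intro v d hd
      have hps : ((PySem.Dict.mk residue_index).getD ch []).Nodup ∧
          ∀ p ∈ (PySem.Dict.mk residue_index).getD ch [], p ∈ ptm_names := by
        rcases getD_index_cases ch with h | ⟨e, he, h⟩
        · rw [h]; exact ⟨List.nodup_nil, by simp⟩
        · rw [h]; exact index_facts e he
      rw [List.foldl_cons,
        ih (fun p => v p + if p ∈ (PySem.Dict.mk residue_index).getD ch [] then 1 else 0) _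
          (inner_fold _ v d hps.1 hps.2 hd)]
      apply List.map_congr_left
      intro p _
      have : t.countP (fun ch => decide (p ∈ (PySem.Dict.mk residue_index).getD ch [])) + (if p ∈ (PySem.Dict.mk residue_index).getD ch [] then 1 else 0) = (ch :: t).countP (fun ch => decide (p ∈ (PySem.Dict.mk residue_index).getD ch [])) := by
        rw [List.countP_cons]
        by_cases hp : p ∈ (PySem.Dict.mk residue_index).getD ch [] <;> simp [hp]
      refine congrArg (Prod.mk p) ?_
      rw [← this]
      push_cast
      ring

-- counting members of r :: t is counting r plus counting members of t (r not in t)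
theorem countP_cons_mem (r : Char) (t : List Char) (hr : r ∉ t) :
    ∀ l : List Char, l.countP (fun ch => decide (ch ∈ r :: t))
      = l.count r + l.countP (fun ch => decide (ch ∈ t)) := by
  intro l
  induction l with
  | nil => simp
  | cons c l ih =>
      simp only [List.countP_cons, List.count_cons, ih]
      by_cases hc : c = r
      · subst hc; simp [hr]; omega
      · by_cases hct : c ∈ t <;> simp [hc, hct] <;> omega

-- a sum of per-letter counts over a duplicate-free list is one countP
theorem sum_counts_eq_countP :
    ∀ (rs : List Char) (l : List Char), rs.Nodup →
      (rs.map (fun r => (l.count r : Int))).sum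
        = (l.countP (fun ch => decide (ch ∈ rs)) : Int) := by
  intro rs
  induction rs with
  | nil => intro l _; simp
  | cons r t ih =>
      intro l hnd
      rw [List.map_cons, List.sum_cons, countP_cons_mem r t (List.nodup_cons.mp hnd).1 l,
        ih l (List.nodup_cons.mp hnd).2]
      push_cast
      ring

-- ===== VERDICT (by name: the statement is the Claim_ definition above) =====
theorem calculate_ptm_occurrences_spec : Claim_equal_calculate_ptm_occurrences := by
  unfold Claim_equal_calculate_ptm_occurrences
  intro sequence _
  unfold Spec_calculate_ptm_occurrences
  unfold calculate_ptm_occurrences calculate_ptm_occurrences_alt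
  rw [PySem.Dict.items_foldl_insert_fresh
        (k := fun pr => pr.1)
        (v := fun pr => pr.2.foldl
          (fun count r => count + (PySem.Str.count (PySem.Str.upper sequence) (String.ofList [r]) : Int)) 0)
        (l := ptm_rules) (d := PySem.Dict.empty)
        (by intro a _; simp) (by decide)]
  rw [ofList_index,
    outer_fold (PySem.Str.upper sequence).toList (fun _ => 0)
      (ptm_names.foldl (fun d ptm => d.insert ptm 0) PySem.Dict.empty)
      (by
        rw [PySem.Dict.items_foldl_insert_fresh (k := fun p => p) (v := fun _ => 0)
          (l := ptm_names) (d := PySem.Dict.empty) (by intro a _; simp) (by simpa using names_nodup)]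
        simp [PySem.Dict.empty])]
  simp only [PySem.Dict.empty, List.nil_append, names_eq, List.map_map]
  apply List.map_congr_left
  intro pr hpr
  have hnd : pr.2.Nodup := rules_nodup pr hpr
  have hset : ∀ ch : Char, (pr.1 ∈ (PySem.Dict.mk residue_index).getD ch []) ↔ ch ∈ pr.2 := by
    intro ch
    rw [mem_getD_mk pr.1 residue_index index_keys_nodup ch,
      List.filter_congr (fun e he => cross_fact pr hpr e he),
      mem_map_fst_filter_key (fun c => decide (c ∈ pr.2)) ch residue_index]
    constructor
    · intro h; exact of_decide_eq_true h.2
    · intro h; exact ⟨index_keys_eq ▸ rules_keys pr hpr ch h, decide_eq_true h⟩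
  have hrw : (fun (count : Int) (r : Char) =>
        count + (PySem.Str.count (PySem.Str.upper sequence) (String.ofList [r]) : Int))
      = fun (count : Int) r => count + (((PySem.Str.upper sequence).toList.count r : Int)) := by
    funext count r
    simp [PySem.Str.count_eq, chars_count_singleton]
  simp only [hrw]
  refine congrArg (Prod.mk pr.1) ?_
  rw [foldl_add_sum _ pr.2 0, zero_add, zero_add, sum_counts_eq_countP pr.2 _ hnd]
  exact congrArg (fun n : Nat => (n : Int))
    (List.countP_congr (fun ch _ => by simpa using (hset ch).symm))
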